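-- pv_equiv track=rewrite | github.com/findaikichi-hub/ai-company-devcrew-jp | 01_original_source/devCrew_s_upstream/tools/infrastructure_security/remediation_engine.py | _classify_issue
-- ===== SOURCE A (Python) =====
-- from typing import Any, Dict, List, Optional
--
-- def _classify_issue(finding: Dict[str, Any]) -> str:
--     """Classify the type of security issue."""
--     title = finding.get("title", "").lower()
--     description = finding.get("description", "").lower()
--     rule_id = finding.get("rule_id", "").lower()
--
--     combined_text = f"{title} {description} {rule_id}"
--
--     if any(
--         kw in combined_text
--         for kw in ["password", "secret", "api key", "token", "credential"]
--     ):
--         return "hardcoded_secret"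
--     elif any(
--         kw in combined_text
--         for kw in [
--             "security group",
--             "0.0.0.0",  # Pattern for insecure network rule detection
--             "open port",
--             "firewall",
--         ]
--     ):
--         return "open_security_group"
--     elif any(
--         kw in combined_text for kw in ["encryption", "md5", "sha1", "ssl", "tls"]
--     ):
--         return "weak_encryption"
--     elif "terraform" in combined_text or finding.get("file", "").endswith(".tf"):
--         return "terraform_misconfiguration"
--     elif "dockerfile" in combined_text or finding.get("file", "").endswith(
--         "Dockerfile"
--     ):
--         return "docker_misconfiguration"
--     elif "kubernetes" in combined_text or finding.get("file", "").endswith(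
--         (".yaml", ".yml")
--     ):
--         return "kubernetes_misconfiguration"
--     else:
--         return "unknown"
-- ===== SOURCE B (Python) =====
-- # Two-stage classification: collect ALL matching categories first, then resolve by priority.
-- _KEYWORD_LABELS = [
--     ("password", "hardcoded_secret"),
--     ("secret", "hardcoded_secret"),
--     ("api key", "hardcoded_secret"),
--     ("token", "hardcoded_secret"),
--     ("credential", "hardcoded_secret"),
--     ("security group", "open_security_group"),
--     ("0.0.0.0", "open_security_group"),
--     ("open port", "open_security_group"),
--     ("firewall", "open_security_group"),
--     ("encryption", "weak_encryption"),
--     ("md5", "weak_encryption"),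
--     ("sha1", "weak_encryption"),
--     ("ssl", "weak_encryption"),
--     ("tls", "weak_encryption"),
--     ("terraform", "terraform_misconfiguration"),
--     ("dockerfile", "docker_misconfiguration"),
--     ("kubernetes", "kubernetes_misconfiguration"),
-- ]
--
-- _SUFFIX_LABELS = [
--     (".tf", "terraform_misconfiguration"),
--     ("Dockerfile", "docker_misconfiguration"),
--     (".yaml", "kubernetes_misconfiguration"),
--     (".yml", "kubernetes_misconfiguration"),
-- ]
--
-- _PRIORITY = [
--     "hardcoded_secret",
--     "open_security_group",
--     "weak_encryption",
--     "terraform_misconfiguration",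
--     "docker_misconfiguration",
--     "kubernetes_misconfiguration",
-- ]
--
--
-- def _classify_issue(finding):
--     """Classify the type of security issue (collect all matches, then pick by priority)."""
--     text = " ".join(
--         finding.get(k, "").lower() for k in ("title", "description", "rule_id")
--     )
--     file = finding.get("file", "")
--     matched = [label for kw, label in _KEYWORD_LABELS if kw in text]
--     matched += [label for suf, label in _SUFFIX_LABELS if file.endswith(suf)]
--     return next((label for label in _PRIORITY if label in matched), "unknown")
-- ===== Notes on version B (the rewrite author's own statement) =====
-- stated objective: alternative
-- what changed: Replaces A's early-return if/elif cascade by a two-stage algorithm: first collect the labels of ALL matching keyword and filename-suffix rules into a list, then resolve by returning the highest-priority label present (default 'unknown').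
import Mathlib
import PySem

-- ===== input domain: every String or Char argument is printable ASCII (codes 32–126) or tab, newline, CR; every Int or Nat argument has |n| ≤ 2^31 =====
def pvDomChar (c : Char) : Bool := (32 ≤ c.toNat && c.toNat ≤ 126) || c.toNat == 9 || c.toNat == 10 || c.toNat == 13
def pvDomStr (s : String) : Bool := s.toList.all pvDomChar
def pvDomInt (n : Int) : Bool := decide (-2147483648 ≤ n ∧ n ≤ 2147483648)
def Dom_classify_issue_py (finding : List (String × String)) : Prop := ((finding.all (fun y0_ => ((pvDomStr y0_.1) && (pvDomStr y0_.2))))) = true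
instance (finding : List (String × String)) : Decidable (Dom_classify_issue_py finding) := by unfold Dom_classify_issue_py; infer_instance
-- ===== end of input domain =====

-- B replaces A's early-return cascade by a two-stage algorithm (collect all matching
-- labels, then resolve by a priority list); alternative decomposition, same cost.

-- ===== PORT A =====
def classify_issue_py (finding : List (String × String)) : String :=
  let title := PySem.Str.lower (PySem.Dict.getD ⟨finding⟩ "title" "")
  let description := PySem.Str.lower (PySem.Dict.getD ⟨finding⟩ "description" "")
  let rule_id := PySem.Str.lower (PySem.Dict.getD ⟨finding⟩ "rule_id" "")
  let combined_text := title ++ " " ++ description ++ " " ++ rule_id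
  if ["password", "secret", "api key", "token", "credential"].any
      (fun kw => PySem.Str.isIn kw combined_text) then
    "hardcoded_secret"
  else if ["security group", "0.0.0.0", "open port", "firewall"].any
      (fun kw => PySem.Str.isIn kw combined_text) then
    "open_security_group"
  else if ["encryption", "md5", "sha1", "ssl", "tls"].any
      (fun kw => PySem.Str.isIn kw combined_text) then
    "weak_encryption"
  else if PySem.Str.isIn "terraform" combined_text
      || PySem.Str.endswith (PySem.Dict.getD ⟨finding⟩ "file" "") ".tf" then
    "terraform_misconfiguration"
  else if PySem.Str.isIn "dockerfile" combined_text
      || PySem.Str.endswith (PySem.Dict.getD ⟨finding⟩ "file" "") "Dockerfile" then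
    "docker_misconfiguration"
  -- .endswith((".yaml", ".yml")) on a tuple = disjunction of the two suffix tests
  else if PySem.Str.isIn "kubernetes" combined_text
      || (PySem.Str.endswith (PySem.Dict.getD ⟨finding⟩ "file" "") ".yaml"
          || PySem.Str.endswith (PySem.Dict.getD ⟨finding⟩ "file" "") ".yml") then
    "kubernetes_misconfiguration"
  else
    "unknown"

-- ===== PORT B =====
-- _KEYWORD_LABELS of Source B: (keyword, label)
def pvKeywordLabels : List (String × String) :=
  [ ("password", "hardcoded_secret"),
    ("secret", "hardcoded_secret"),
    ("api key", "hardcoded_secret"),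
    ("token", "hardcoded_secret"),
    ("credential", "hardcoded_secret"),
    ("security group", "open_security_group"),
    ("0.0.0.0", "open_security_group"),
    ("open port", "open_security_group"),
    ("firewall", "open_security_group"),
    ("encryption", "weak_encryption"),
    ("md5", "weak_encryption"),
    ("sha1", "weak_encryption"),
    ("ssl", "weak_encryption"),
    ("tls", "weak_encryption"),
    ("terraform", "terraform_misconfiguration"),
    ("dockerfile", "docker_misconfiguration"),
    ("kubernetes", "kubernetes_misconfiguration") ]

-- _SUFFIX_LABELS of Source B: (filename suffix, label)
def pvSuffixLabels : List (String × String) :=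
  [ (".tf", "terraform_misconfiguration"),
    ("Dockerfile", "docker_misconfiguration"),
    (".yaml", "kubernetes_misconfiguration"),
    (".yml", "kubernetes_misconfiguration") ]

-- _PRIORITY of Source B
def pvPriority : List String :=
  [ "hardcoded_secret",
    "open_security_group",
    "weak_encryption",
    "terraform_misconfiguration",
    "docker_misconfiguration",
    "kubernetes_misconfiguration" ]

def pvMatched (text file : String) : List String :=
  (pvKeywordLabels.filter (fun p => PySem.Str.isIn p.1 text)).map Prod.snd
  ++ (pvSuffixLabels.filter (fun p => PySem.Str.endswith file p.1)).map Prod.snd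

def classify_issue_py_alt (finding : List (String × String)) : String :=
  let text :=
    PySem.Str.join " "
      (["title", "description", "rule_id"].map
        (fun k => PySem.Str.lower (PySem.Dict.getD ⟨finding⟩ k "")))
  let file := PySem.Dict.getD ⟨finding⟩ "file" ""
  let matched := pvMatched text file
  -- next((label for label in _PRIORITY if label in matched), "unknown")
  (pvPriority.find? (fun l => matched.contains l)).getD "unknown"

-- ===== PRECONDITION & SPEC =====
def Spec_classify_issue_py (finding : List (String × String)) (out : String) : Prop := out = classify_issue_py_alt finding
instance (finding : List (String × String)) (out : String) : Decidable (Spec_classify_issue_py finding out) := by unfold Spec_classify_issue_py; infer_instance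

-- ===== CLAIM (what is proved, stated in full; the proofs are below) =====
def Claim_equal_classify_issue_py : Prop := ∀ (finding : List (String × String)), Dom_classify_issue_py finding → Spec_classify_issue_py finding (classify_issue_py finding)

-- ===== LEMMAS AND PROOFS =====
theorem pvM1 (text file : String) : (pvMatched text file).contains "hardcoded_secret"
    = (PySem.Str.isIn "password" text || (PySem.Str.isIn "secret" text || (PySem.Str.isIn "api key" text || (PySem.Str.isIn "token" text || PySem.Str.isIn "credential" text)))) := by
  simp [pvMatched, pvKeywordLabels, pvSuffixLabels, List.mem_filter, List.mem_map]
theorem pvM2 (text file : String) : (pvMatched text file).contains "open_security_group"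
    = (PySem.Str.isIn "security group" text || (PySem.Str.isIn "0.0.0.0" text || (PySem.Str.isIn "open port" text || PySem.Str.isIn "firewall" text))) := by
  simp [pvMatched, pvKeywordLabels, pvSuffixLabels, List.mem_filter, List.mem_map]
theorem pvM3 (text file : String) : (pvMatched text file).contains "weak_encryption"
    = (PySem.Str.isIn "encryption" text || (PySem.Str.isIn "md5" text || (PySem.Str.isIn "sha1" text || (PySem.Str.isIn "ssl" text || PySem.Str.isIn "tls" text)))) := by
  simp [pvMatched, pvKeywordLabels, pvSuffixLabels, List.mem_filter, List.mem_map]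
theorem pvM4 (text file : String) : (pvMatched text file).contains "terraform_misconfiguration"
    = (PySem.Str.isIn "terraform" text || PySem.Str.endswith file ".tf") := by
  simp [pvMatched, pvKeywordLabels, pvSuffixLabels, List.mem_filter, List.mem_map]
theorem pvM5 (text file : String) : (pvMatched text file).contains "docker_misconfiguration"
    = (PySem.Str.isIn "dockerfile" text || PySem.Str.endswith file "Dockerfile") := by
  simp [pvMatched, pvKeywordLabels, pvSuffixLabels, List.mem_filter, List.mem_map]
theorem pvM6 (text file : String) : (pvMatched text file).contains "kubernetes_misconfiguration"
    = (PySem.Str.isIn "kubernetes" text || (PySem.Str.endswith file ".yaml" || PySem.Str.endswith file ".yml")) := by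
  simp [pvMatched, pvKeywordLabels, pvSuffixLabels, List.mem_filter, List.mem_map]

theorem pv_main (text file : String) :
    (if ["password", "secret", "api key", "token", "credential"].any (fun kw => PySem.Str.isIn kw text) then "hardcoded_secret"
     else if ["security group", "0.0.0.0", "open port", "firewall"].any (fun kw => PySem.Str.isIn kw text) then "open_security_group"
     else if ["encryption", "md5", "sha1", "ssl", "tls"].any (fun kw => PySem.Str.isIn kw text) then "weak_encryption"
     else if PySem.Str.isIn "terraform" text || PySem.Str.endswith file ".tf" then "terraform_misconfiguration"
     else if PySem.Str.isIn "dockerfile" text || PySem.Str.endswith file "Dockerfile" then "docker_misconfiguration"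
     else if PySem.Str.isIn "kubernetes" text || (PySem.Str.endswith file ".yaml" || PySem.Str.endswith file ".yml") then "kubernetes_misconfiguration"
     else "unknown")
    = (pvPriority.find? (fun l => (pvMatched text file).contains l)).getD "unknown" := by
  unfold pvPriority
  simp only [List.find?, List.any_cons, List.any_nil, Bool.or_false, pvM1, pvM2, pvM3, pvM4, pvM5, pvM6]
  repeat' (first | rfl | (split <;> rename_i h <;> (try simp only [Bool.not_eq_true] at h) <;> simp only [h]))

theorem pvJoin_space (a b c : String) :
    PySem.Str.join " " [a, b, c] = a ++ " " ++ b ++ " " ++ c := by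
  simp [PySem.Str.join, PySem.Chars.join, List.intercalate]
  ext1
  simp

-- ===== VERDICT (by name: the statement is the Claim_ definition above) =====
theorem classify_issue_py_spec : Claim_equal_classify_issue_py := by
  intro finding _
  unfold Spec_classify_issue_py classify_issue_py classify_issue_py_alt
  simp only [List.map, pvJoin_space]
  exact pv_main _ _
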